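-- pv_equiv track=rewrite | github.com/mathandalgebra/python-library | python project 2.py | isEquidigital3
-- ===== SOURCE A (Python) =====
-- def isPrime(n):
--     if (n < 2):
--         return False
--     for factor in range(2,n):
--         if (n % factor == 0):
--             return False
--     return True
--
-- def digitCount3(n):
--     return len(str(n))
--
-- def isEquidigital3(n):
--     if n < 3:   return False
--     numDigits = digitCount3(n)
--     primeDigits = 0
--
--     for factor in range(2, n):
--         if n % factor == 0 and isPrime(factor):
--             primeDigits += digitCount3(factor)
--     if isPrime(n):
--         primeDigits += digitCount3(n)
--
--     return primeDigits - numDigits <= 1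
-- ===== SOURCE B (Python) =====
-- def isEquidigital3(n):
--     if n < 3:
--         return False
--     s = 0
--     m = n
--     d = 2
--     while d * d <= m:
--         if m % d == 0:
--             s += len(str(d))
--             while m % d == 0:
--                 m //= d
--         d += 1
--     if m > 1:
--         s += len(str(m))
--     return s - len(str(n)) <= 1
-- ===== Notes on version B (the rewrite author's own statement) =====
-- stated objective: faster
-- what changed: Replaces the scan of all factors in range(2,n) with an inner O(n) primality test by a single trial-division factorization up to sqrt(n) that divides out each prime as it is found.
import Mathlib
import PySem

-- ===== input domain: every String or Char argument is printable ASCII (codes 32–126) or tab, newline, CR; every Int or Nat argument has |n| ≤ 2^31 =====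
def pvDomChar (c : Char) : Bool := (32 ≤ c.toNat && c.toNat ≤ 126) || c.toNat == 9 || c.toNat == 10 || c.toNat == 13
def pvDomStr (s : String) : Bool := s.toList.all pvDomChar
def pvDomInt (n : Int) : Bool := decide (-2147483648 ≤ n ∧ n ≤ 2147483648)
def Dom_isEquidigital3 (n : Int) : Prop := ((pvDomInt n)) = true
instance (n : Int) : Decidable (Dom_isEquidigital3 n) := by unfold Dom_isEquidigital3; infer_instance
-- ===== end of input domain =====

-- B replaces A's scan of every factor in range(2, n) (with an O(n) primality test inside)
-- by one trial-division factorization up to √n; return values agree everywhere (proved below).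

-- ===== PORT A =====
def isPrimeP (k : Int) : Bool :=
  if k < 2 then false
  else (PySem.List.pyRange 2 k 1).all (fun f => !(PySem.Int.mod k f == 0))

def digitCount3P (k : Int) : Int := ((PySem.Int.toChars k).length : Int)  -- len(str(k)); B inlines the same expression

def isEquidigital3 (n : Int) : Bool :=
  if n < 3 then false
  else
    let numDigits := digitCount3P n
    let primeDigits : Int := (PySem.List.pyRange 2 n 1).foldl
      (fun s f => if PySem.Int.mod n f == 0 && isPrimeP f then s + digitCount3P f else s) 0
    let primeDigits := if isPrimeP n then primeDigits + digitCount3P n else primeDigits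
    decide (primeDigits - numDigits ≤ 1)

-- ===== PORT B =====
-- inner `while m % d == 0: m //= d`; the `2 ≤ d ∧ 1 ≤ m` part of the guard only
-- makes the recursion total (it holds at every call the port makes)
def stripP (m d : Int) : Int :=
  if h : PySem.Int.mod m d == 0 ∧ 2 ≤ d ∧ 1 ≤ m then
    stripP (PySem.Int.floordiv m d) d
  else m
termination_by m.toNat
decreasing_by
  obtain ⟨-, h2, h1⟩ := h
  rw [PySem.Int.floordiv_eq_ediv_of_pos (by omega)]
  have : m / d < m := Int.ediv_lt_of_lt_mul (by omega) (by nlinarith)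
  have : 0 ≤ m / d := Int.ediv_nonneg (by omega) (by omega)
  omega

-- needed by trialLoopP's termination proof
theorem stripP_bounds (m d : Int) (hm : 1 ≤ m) (hd : 2 ≤ d) :
    1 ≤ stripP m d ∧ stripP m d ≤ m := by
  rw [stripP]
  split
  · rename_i h
    have hdvd : d ∣ m := (PySem.Int.mod_eq_zero_iff_dvd m d).mp (by simpa using h.1)
    rw [PySem.Int.floordiv_eq_ediv_of_pos (by omega)]
    have hq1 : 1 ≤ m / d := (Int.le_ediv_iff_mul_le (by omega)).mpr
      (by have := Int.le_of_dvd (by omega) hdvd; omega)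
    have hqm : m / d < m := Int.ediv_lt_of_lt_mul (by omega) (by nlinarith)
    have ih := stripP_bounds (m / d) d hq1 hd
    exact ⟨ih.1, le_trans ih.2 (le_of_lt hqm)⟩
  · exact ⟨hm, le_refl m⟩
termination_by m.toNat
decreasing_by
  have : m / d < m := Int.ediv_lt_of_lt_mul (by omega) (by nlinarith)
  have : 0 ≤ m / d := Int.ediv_nonneg (by omega) (by omega)
  omega

-- `while d * d <= m:` loop; the `2 ≤ d` guard conjunct only makes the recursion total
def trialLoopP (m d s : Int) : Int × Int :=
  if h : d * d ≤ m ∧ 2 ≤ d then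
    if PySem.Int.mod m d == 0 then
      trialLoopP (stripP m d) (d + 1) (s + digitCount3P d)
    else
      trialLoopP m (d + 1) s
  else (s, m)
termination_by (m.toNat + 1 - d.toNat)
decreasing_by
  · have hm1 : 1 ≤ m := by nlinarith [h.1]
    have hdm : d ≤ m := le_trans (by nlinarith) h.1
    have hs := stripP_bounds m d hm1 h.2
    omega
  · have hdm : d ≤ m := le_trans (by nlinarith) h.1
    omega

def isEquidigital3_alt (n : Int) : Bool :=
  if n < 3 then false
  else
    let r := trialLoopP n 2 0
    let s := if 1 < r.2 then r.1 + digitCount3P r.2 else r.1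
    decide (s - digitCount3P n ≤ 1)

-- ===== PRECONDITION & SPEC =====
def Spec_isEquidigital3 (n : Int) (out : Bool) : Prop := out = isEquidigital3_alt n
instance (n : Int) (out : Bool) : Decidable (Spec_isEquidigital3 n out) := by unfold Spec_isEquidigital3; infer_instance

-- ===== CLAIM (what is proved, stated in full; the proofs are below) =====
def Claim_equal_isEquidigital3 : Prop := ∀ (n : Int), Dom_isEquidigital3 n → Spec_isEquidigital3 n (isEquidigital3 n)

-- ===== LEMMAS AND PROOFS =====

-- A's isPrime is primality of the absolute value taken by toNat
theorem isPrimeP_eq (k : Int) : isPrimeP k = decide (Nat.Prime k.toNat) := by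
  by_cases hk : k < 2
  · have hnp : ¬ Nat.Prime k.toNat := fun h => by have := h.two_le; omega
    simp [isPrimeP, hk, hnp]
  · have hk2 : 2 ≤ k := by omega
    have hkK : k = ↑k.toNat := by omega
    rw [Bool.eq_iff_iff]
    simp only [isPrimeP, if_neg hk, List.all_eq_true, PySem.List.mem_pyRange_one,
      decide_eq_true_eq, Bool.not_eq_true', beq_eq_false_iff_ne]
    constructor
    · intro h
      rw [Nat.prime_def_lt]
      refine ⟨by omega, fun q hqlt hqdvd => ?_⟩
      by_contra hq1
      have hq0 : q ≠ 0 := by rintro rfl; simp at hqdvd; omega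
      have hqd : (q : Int) ∣ k := by rw [hkK]; exact_mod_cast hqdvd
      have := h (q : Int) ⟨by omega, by omega⟩
      exact this ((PySem.Int.mod_eq_zero_iff_dvd k (q : Int)).mpr hqd)
    · rintro hp f ⟨h2f, hfk⟩ hmod0
      have hfd : f ∣ k := (PySem.Int.mod_eq_zero_iff_dvd k f).mp hmod0
      have hfdN : f.toNat ∣ k.toNat := by
        have h1 : (↑f.toNat : Int) ∣ (↑k.toNat : Int) := by
          rw [← hkK, Int.toNat_of_nonneg (by omega : (0:Int) ≤ f)]; exact hfd
        exact_mod_cast h1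
      rcases (hp.eq_one_or_self_of_dvd _ hfdN) with h | h <;> omega

-- generic accumulator shape of A's loop
theorem foldl_ite_add (l : List Int) (a : Int) (c : Int → Bool) (g : Int → Int) :
    l.foldl (fun s f => if c f then s + g f else s) a
      = a + (l.map (fun f => if c f then g f else 0)).sum := by
  induction l generalizing a with
  | nil => simp
  | cons x xs ih =>
    simp only [List.foldl_cons, List.map_cons, List.sum_cons, ih]
    split <;> ring

-- A's whole prime-digit accumulation is the sum over the distinct prime factors
theorem a_side (n : Int) (hn : 3 ≤ n) :
    ((PySem.List.pyRange 2 n 1).foldl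
        (fun s f => if PySem.Int.mod n f == 0 && isPrimeP f then s + digitCount3P f else s) 0)
      + (if isPrimeP n then digitCount3P n else 0)
      = ∑ p ∈ n.toNat.primeFactors, digitCount3P (p : Int) := by
  have hnK : n = ↑n.toNat := by omega
  set K := n.toNat with hKdef
  have hK3 : 3 ≤ K := by omega
  rw [foldl_ite_add, PySem.List.pyRange_one, List.map_map]
  have hlen : (n - 2).toNat = K - 2 := by omega
  rw [hlen]
  have hlist : ∀ g : Nat → Int, ((List.range (K - 2)).map g).sum = ∑ i ∈ Finset.range (K - 2), g i :=
    fun g => rfl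
  rw [hlist]
  set F : Nat → Int := fun j => if j ∣ K ∧ j.Prime then digitCount3P (j : Int) else 0 with hF
  have hstep : ∀ i ∈ Finset.range (K - 2),
      ((fun f => if PySem.Int.mod n f == 0 && isPrimeP f then digitCount3P f else 0) ∘ fun k : Nat => 2 + (k : Int)) i
        = F (2 + i) := by
    intro i _
    simp only [Function.comp]
    have hcast : (2 : Int) + (i : Int) = ((2 + i : Nat) : Int) := by push_cast; ring
    rw [hcast]
    have hmod : (PySem.Int.mod n ((2 + i : Nat) : Int) == 0) = decide ((2 + i) ∣ K) := by
      rw [Bool.eq_iff_iff]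
      simp only [beq_iff_eq, PySem.Int.mod_eq_zero_iff_dvd, decide_eq_true_eq]
      rw [hnK]
      exact_mod_cast Iff.rfl
    have hpr : isPrimeP ((2 + i : Nat) : Int) = decide ((2 + i).Prime) := by
      rw [isPrimeP_eq, Int.toNat_natCast]
    rw [hmod, hpr, hF]
    by_cases h1 : (2 + i) ∣ K <;> by_cases h2 : (2 + i).Prime <;>
      simp [h1, h2, digitCount3P, digitCount3P]
  rw [Finset.sum_congr rfl hstep, zero_add, ← Finset.sum_Ico_eq_sum_range]
  have htop : (if isPrimeP n then digitCount3P n else 0) = F K := by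
    have hpn : isPrimeP n = decide K.Prime := by rw [isPrimeP_eq]
    rw [hpn, hF]
    by_cases h2 : K.Prime <;> simp [h2, digitCount3P, digitCount3P, hnK]
  rw [htop]
  rw [← Finset.sum_Ico_succ_top (by omega : 2 ≤ K)]
  rw [hF]
  rw [← Finset.sum_filter]
  congr 1
  ext p
  simp only [Finset.mem_filter, Finset.mem_Ico, Nat.mem_primeFactors]
  constructor
  · rintro ⟨⟨h2, _⟩, hdvd, hp⟩
    exact ⟨hp, hdvd, by omega⟩
  · rintro ⟨hp, hdvd, _⟩
    have := Nat.le_of_dvd (by omega) hdvd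
    exact ⟨⟨hp.two_le, by omega⟩, hdvd, hp⟩

-- stripP divides out exactly the d-part
theorem stripP_spec (m d : Int) (hm : 1 ≤ m) (hd : 2 ≤ d) :
    ∃ j : Nat, m = d ^ j * stripP m d ∧ ¬ d ∣ stripP m d := by
  rw [stripP]
  split
  · rename_i h
    have hdvd : d ∣ m := (PySem.Int.mod_eq_zero_iff_dvd m d).mp (by simpa using h.1)
    rw [PySem.Int.floordiv_eq_ediv_of_pos (by omega)]
    have hq1 : 1 ≤ m / d := (Int.le_ediv_iff_mul_le (by omega)).mpr
      (by have := Int.le_of_dvd (by omega) hdvd; omega)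
    obtain ⟨j, hj, hnd⟩ := stripP_spec (m / d) d hq1 hd
    refine ⟨j + 1, ?_, hnd⟩
    have hmd : d * (m / d) = m := Int.mul_ediv_cancel' hdvd
    calc m = d * (m / d) := hmd.symm
      _ = d * (d ^ j * stripP (m / d) d) := by rw [← hj]
      _ = d ^ (j + 1) * stripP (m / d) d := by ring
  · rename_i h
    refine ⟨0, by ring, fun hdm => ?_⟩
    exact h ⟨by simp [(PySem.Int.mod_eq_zero_iff_dvd m d).mpr hdm], hd, hm⟩
termination_by m.toNat
decreasing_by
  have : m / d < m := Int.ediv_lt_of_lt_mul (by omega) (by nlinarith)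
  have : 0 ≤ m / d := Int.ediv_nonneg (by omega) (by omega)
  omega

-- removing the full q-part of M removes exactly q from the prime factors
theorem primeFactors_erase (M R q j : Nat) (hq : q.Prime) (hM : M = q ^ j * R)
    (hnd : ¬ q ∣ R) (hR : R ≠ 0) : R.primeFactors = M.primeFactors.erase q := by
  have hM0 : M ≠ 0 := by
    rw [hM]; exact Nat.mul_ne_zero (pow_ne_zero j hq.ne_zero) hR
  ext p
  simp only [Nat.mem_primeFactors, Finset.mem_erase]
  constructor
  · rintro ⟨hp, hpR, _⟩
    refine ⟨fun he => hnd (he ▸ hpR), hp, ?_, hM0⟩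
    rw [hM]; exact hpR.mul_left _
  · rintro ⟨hne, hp, hpM, _⟩
    refine ⟨hp, ?_, hR⟩
    have hcop : Nat.Coprime p (q ^ j) :=
      Nat.Coprime.pow_right j ((Nat.Prime.coprime_iff_not_dvd hp).mpr
        (fun h => hne ((Nat.prime_dvd_prime_iff_eq hp hq).mp h)))
    exact hcop.dvd_of_dvd_mul_left (hM ▸ hpM)

-- the trial-division loop (with its trailing `if m > 1` correction) sums the
-- digit lengths of the distinct prime factors of m
theorem loop_spec (m d s : Int) (hm : 1 ≤ m) (hd : 2 ≤ d)
    (hinv : ∀ p : Nat, p.Prime → (p : Int) ∣ m → d ≤ (p : Int)) :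
    (if 1 < (trialLoopP m d s).2 then (trialLoopP m d s).1 + digitCount3P (trialLoopP m d s).2
     else (trialLoopP m d s).1)
      = s + ∑ p ∈ m.toNat.primeFactors, digitCount3P (p : Int) := by
  rw [trialLoopP]
  split
  · rename_i hg
    have hg1 := hg.1
    have hdm : d ≤ m := le_trans (by nlinarith) hg1
    split
    · rename_i hmod
      have hdvd : d ∣ m := (PySem.Int.mod_eq_zero_iff_dvd m d).mp (by simpa using hmod)
      set D := d.toNat with hDdef
      have hdD : d = ↑D := by omega
      -- the current divisor is prime: any smaller prime factor of d would divide m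
      have hqp := Nat.minFac_prime (show D ≠ 1 by omega)
      have hqdM : (D.minFac : Int) ∣ m := by
        refine dvd_trans ?_ hdvd
        rw [hdD]; exact_mod_cast Nat.minFac_dvd D
      have hge := hinv D.minFac hqp hqdM
      have hle : D.minFac ≤ D := Nat.minFac_le (by omega)
      have hDq : D.minFac = D := by omega
      have hDp : D.Prime := hDq ▸ hqp
      obtain ⟨j, hjm, hnd⟩ := stripP_spec m d hm hd
      have hb := stripP_bounds m d hm hd
      set r := stripP m d with hr
      set R := r.toNat with hRdef
      have hrR : r = ↑R := by omega
      have hrdvdm : r ∣ m := ⟨d ^ j, by rw [hjm]; ring⟩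
      have hM : m.toNat = D ^ j * R := by
        have h1 : (↑m.toNat : Int) = ↑(D ^ j * R) := by
          push_cast
          rw [← hdD, ← hrR, Int.toNat_of_nonneg (by omega : (0:Int) ≤ m)]
          exact hjm
        exact_mod_cast h1
      have hndN : ¬ D ∣ R := fun h => hnd (by rw [hdD, hrR]; exact_mod_cast h)
      have hpf := primeFactors_erase m.toNat R D j hDp hM hndN (by omega)
      have hinv' : ∀ p : Nat, p.Prime → (p : Int) ∣ r → d + 1 ≤ (p : Int) := by
        intro p hp hpr
        have h1 := hinv p hp (hpr.trans hrdvdm)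
        have hne : (p : Int) ≠ d := by
          intro he
          apply hndN
          have hpD : p = D := by omega
          subst hpD
          exact_mod_cast hrR ▸ hpr
        omega
      have ih := loop_spec r (d + 1) (s + digitCount3P d) (by omega) (by omega) hinv'
      rw [ih, hpf]
      have hj1 : 1 ≤ j := by
        rcases j with _ | j
        · exfalso; apply hnd; rw [pow_zero, one_mul] at hjm; exact hjm ▸ hdvd
        · omega
      have hmem : D ∈ m.toNat.primeFactors :=
        Nat.mem_primeFactors.mpr
          ⟨hDp, by rw [hM]; exact dvd_mul_of_dvd_left (dvd_pow_self D (by omega)) R, by omega⟩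
      rw [← Finset.add_sum_erase _ _ hmem, hdD]
      ring
    · rename_i hmod
      have hndvd : ¬ d ∣ m := fun h => by
        simp [(PySem.Int.mod_eq_zero_iff_dvd m d).mpr h] at hmod
      have hinv' : ∀ p : Nat, p.Prime → (p : Int) ∣ m → d + 1 ≤ (p : Int) := by
        intro p hp hpm
        have h1 := hinv p hp hpm
        have hne : (p : Int) ≠ d := fun he => hndvd (he ▸ hpm)
        omega
      exact loop_spec m (d + 1) s hm (by omega) hinv'
  · rename_i hg
    have hlt : m < d * d := by
      by_contra hc
      exact hg ⟨by omega, hd⟩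
    by_cases hm1 : m = 1
    · subst hm1
      norm_num
    · have hm2 : 2 ≤ m := by omega
      have hmM : m = ↑m.toNat := by omega
      set M := m.toNat with hMdef
      have hM2 : 2 ≤ M := by omega
      have hpp := Nat.minFac_prime (show M ≠ 1 by omega)
      set p := M.minFac with hpdef
      have hpd : p ∣ M := Nat.minFac_dvd M
      have hgp := hinv p hpp (by rw [hmM]; exact_mod_cast hpd)
      set k := M / p with hkdef
      have hMk : M = p * k := (Nat.mul_div_cancel' hpd).symm
      have hk0 : k ≠ 0 := by rintro h; rw [h, mul_zero] at hMk; omega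
      have hMprime : M.Prime := by
        by_cases hk : k = 1
        · rw [hMk, hk, mul_one]; exact hpp
        · exfalso
          have hq := Nat.minFac_prime hk
          have hqM : k.minFac ∣ M := (Nat.minFac_dvd k).trans ⟨p, by rw [hMk]; ring⟩
          have hgq := hinv k.minFac hq (by rw [hmM]; exact_mod_cast hqM)
          have hqlek : k.minFac ≤ k := Nat.minFac_le (Nat.pos_of_ne_zero hk0)
          have hpkm : ((p : Int)) * (k : Int) = m := by rw [hmM]; exact_mod_cast hMk.symm
          have h3 : ((k.minFac : Int)) ≤ (k : Int) := by exact_mod_cast hqlek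
          nlinarith
      rw [hMprime.primeFactors, Finset.sum_singleton]
      have h1m : (1 : Int) < m := by omega
      simp only [h1m, if_true, ← hmM]
termination_by (m.toNat + 1 - d.toNat)
decreasing_by
  · omega
  · omega

-- ===== VERDICT (by name: the statement is the Claim_ definition above) =====
theorem isEquidigital3_spec : Claim_equal_isEquidigital3 := by
  intro n _
  unfold Spec_isEquidigital3 isEquidigital3 isEquidigital3_alt
  by_cases hn : n < 3
  · simp [hn]
  · have hn3 : 3 ≤ n := by omega
    simp only [if_neg hn]
    have hb := loop_spec n 2 0 (by omega) (by omega)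
      (fun p hp _ => by exact_mod_cast hp.two_le)
    have ha := a_side n hn3
    have hsplit : (if isPrimeP n then
        ((PySem.List.pyRange 2 n 1).foldl
          (fun s f => if PySem.Int.mod n f == 0 && isPrimeP f then s + digitCount3P f else s) 0)
          + digitCount3P n
      else ((PySem.List.pyRange 2 n 1).foldl
          (fun s f => if PySem.Int.mod n f == 0 && isPrimeP f then s + digitCount3P f else s) 0))
        = ∑ p ∈ n.toNat.primeFactors, digitCount3P (p : Int) := by
      rw [← ha]; split <;> simp
    simp only [hsplit]
    rw [hb]
    simp [digitCount3P, digitCount3P]
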